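-- pv_equiv track=rewrite | github.com/bssrdf/pyleet | N/NumberofSubarrayswithMaximumElementsAtFirstorLast.py | numberOfSubarrays2
-- ===== SOURCE A (Python) =====
-- from typing import List
--
-- def numberOfSubarrays2(nums: List[int]) -> int:
--     n = len(nums)
--     ans = 0
--     for i in range(n):
--         ans += 1
--         mx = nums[i]
--         for j in range(i+1,n):
--             mx = max(mx, nums[j])
--             if mx == nums[i] or mx == nums[j]:
--                 ans += 1
--     return ans
-- ===== SOURCE B (Python) =====
-- from typing import List
--
-- def numberOfSubarrays2(nums: List[int]) -> int:
--     # One pass with a monotonic stack of groups (value, count, last_index, prev_greater_index).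
--     # A subarray qualifies iff its max equals max(first, last); per right endpoint j we add:
--     #   1 (the singleton) + #visible left endpoints with value >= nums[j]
--     #   + #left endpoints strictly smaller than nums[j] with interior max <= nums[j].
--     ans = 0
--     stack = []  # values strictly decreasing bottom -> top
--     total = 0   # sum of counts on the stack
--     for j, x in enumerate(nums):
--         while stack and stack[-1][0] < x:
--             total -= stack.pop()[1]
--         if stack:
--             v, c, li, pg = stack[-1]
--             if v == x:
--                 p, eq = pg, c
--                 stack[-1] = (v, c + 1, j, pg)
--             else:
--                 p, eq = li, 0
--                 stack.append((x, 1, j, li))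
--         else:
--             p, eq = -1, 0
--             stack.append((x, 1, j, -1))
--         ans += 1 + total + (j - p - 1 - eq)
--         total += 1
--     return ans
-- ===== Notes on version B (the rewrite author's own statement) =====
-- stated objective: faster
-- what changed: Replaced A's nested O(n^2) scan (for each start, extend with a running max) by a single left-to-right pass with a monotonic stack of (value, count, last-index, previous-greater-index) groups that counts, per right endpoint, the qualifying left endpoints in O(1) amortized.
import Mathlib
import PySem

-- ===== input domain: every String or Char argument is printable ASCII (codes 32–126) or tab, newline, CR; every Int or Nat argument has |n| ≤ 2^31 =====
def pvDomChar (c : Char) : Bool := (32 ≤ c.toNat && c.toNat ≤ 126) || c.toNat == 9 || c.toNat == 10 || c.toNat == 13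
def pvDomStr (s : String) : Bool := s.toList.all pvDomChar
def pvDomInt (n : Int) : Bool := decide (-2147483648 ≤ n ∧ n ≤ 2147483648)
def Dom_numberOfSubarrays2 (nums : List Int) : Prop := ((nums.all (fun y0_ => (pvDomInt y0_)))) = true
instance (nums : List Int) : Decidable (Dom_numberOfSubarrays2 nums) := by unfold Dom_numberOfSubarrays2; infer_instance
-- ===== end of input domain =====

-- B replaces A's O(n^2) nested scan by a single O(n) pass with a monotonic stack of
-- (value, count, last index, previous-greater index) groups (objective: faster, asymptotic).

-- ===== PORT A =====
def numberOfSubarrays2 (nums : List Int) : Int :=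
  let n : Int := (nums.length : Int)
  (PySem.List.pyRange 0 n 1).foldl (fun ans i =>
    let ans := ans + 1
    let mx := PySem.List.pyGetD nums i 0
    ((PySem.List.pyRange (i+1) n 1).foldl (fun (st : Int × Int) j =>
        let mx := max st.2 (PySem.List.pyGetD nums j 0)
        if mx = PySem.List.pyGetD nums i 0 ∨ mx = PySem.List.pyGetD nums j 0 then
          (st.1 + 1, mx)
        else (st.1, mx)) (ans, mx)).1) 0

-- ===== PORT B =====
-- the while-pop loop: pops groups whose value is < x, subtracting their counts from total
def pvPop (x : Int) : List (Int × Int × Int × Int) → Int → List (Int × Int × Int × Int) × Int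
  | [], total => ([], total)
  | (v, c, li, pg) :: rest, total =>
      if v < x then pvPop x rest (total - c) else ((v, c, li, pg) :: rest, total)

def numberOfSubarrays2_alt (nums : List Int) : Int :=
  ((PySem.List.enumerate nums 0).foldl
    (fun (s : Int × List (Int × Int × Int × Int) × Int) jx =>
      let ans := s.1
      let j := jx.1
      let x := jx.2
      let popped := pvPop x s.2.1 s.2.2
      let total := popped.2
      let step :=
        match popped.1 with
        | (v, c, li, pg) :: rest =>
            if v = x then (pg, c, (v, c + 1, j, pg) :: rest)
            else (li, (0 : Int), (x, 1, j, li) :: (v, c, li, pg) :: rest)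
        | [] => (-1, (0 : Int), [(x, 1, j, -1)])
      (ans + 1 + total + (j - step.1 - 1 - step.2.1), step.2.2, total + 1))
    (0, [], 0)).1

-- ===== PRECONDITION & SPEC =====
def Spec_numberOfSubarrays2 (nums : List Int) (out : Int) : Prop := out = numberOfSubarrays2_alt nums
instance (nums : List Int) (out : Int) : Decidable (Spec_numberOfSubarrays2 nums out) := by unfold Spec_numberOfSubarrays2; infer_instance

-- ===== CLAIM (what is proved, stated in full; the proofs are below) =====
def Claim_equal_numberOfSubarrays2 : Prop := ∀ (nums : List Int), Dom_numberOfSubarrays2 nums → Spec_numberOfSubarrays2 nums (numberOfSubarrays2 nums)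

-- ===== LEMMAS AND PROOFS =====
-- ======================= proof-side definitions =======================

-- element access used throughout the proofs
abbrev pvG (xs : List Int) (k : Nat) : Int := xs.getD k 0

-- the pair (i, j) qualifies: the max of xs[i..j] sits at i or at j
abbrev pvQ (xs : List Int) (i j : Nat) : Prop :=
  (∀ k ∈ Finset.Icc i j, pvG xs k ≤ pvG xs i) ∨ (∀ k ∈ Finset.Icc i j, pvG xs k ≤ pvG xs j)

-- count of qualifying pairs with right endpoint t (column t)
def pvCol (xs : List Int) (t : Nat) : Int :=
  ∑ i ∈ Finset.range (t+1), (if pvQ xs i t then (1:Int) else 0)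

def pvU (xs : List Int) (t : Nat) : Int := ∑ j ∈ Finset.range t, pvCol xs j

-- row tail for A: qualifying pairs (i, k) with i < k, k ∈ [m, n)
def pvCnt (xs : List Int) (i m n : Nat) : Int :=
  ∑ k ∈ Finset.Ico m n, (if pvQ xs i k then (1:Int) else 0)

-- running max of xs[i..j], exactly as A maintains it
def pvM (xs : List Int) (i : Nat) : Nat → Int
  | 0 => pvG xs i
  | j+1 => if j+1 ≤ i then pvG xs i else max (pvM xs i j) (pvG xs (j+1))

-- "visible" left endpoints: i sees past everything up to t-1
abbrev pvVis (xs : List Int) (t i : Nat) : Prop := ∀ k ∈ Finset.Ioo i t, pvG xs k ≤ pvG xs i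
abbrev pvS (xs : List Int) (t : Nat) : Finset Nat := (Finset.range t).filter (pvVis xs t)
abbrev pvRun (xs : List Int) (t : Nat) (v : Int) : Finset Nat :=
  (pvS xs t).filter (fun i => pvG xs i = v)

def pvSumC : List (Int × Int × Int × Int) → Int
  | [] => 0
  | G :: rest => G.2.1 + pvSumC rest

-- p is (the index of) the last element strictly greater than v, or -1 if none
def pvPG (xs : List Int) (t : Nat) (v p : Int) : Prop :=
  (p = -1 ∧ ∀ k ∈ Finset.range t, pvG xs k ≤ v) ∨
  (∃ m ∈ Finset.range t, v < pvG xs m ∧ (∀ k ∈ Finset.Ioo m t, pvG xs k ≤ v) ∧ p = (m : Int))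

def pvGrpOK (xs : List Int) (t : Nat) (G : Int × Int × Int × Int) : Prop :=
  G.2.1 = ((pvRun xs t G.1).card : Int) ∧
  (∃ m ∈ pvRun xs t G.1, (∀ i ∈ pvRun xs t G.1, i ≤ m) ∧ G.2.2.1 = (m : Int)) ∧
  pvPG xs t G.1 G.2.2.2

def pvInv (xs : List Int) (t : Nat) (st : List (Int × Int × Int × Int)) : Prop :=
  (∀ G ∈ st, pvGrpOK xs t G) ∧ st.Pairwise (fun a b => a.1 < b.1) ∧
  (∀ i ∈ pvS xs t, ∃ G ∈ st, G.1 = pvG xs i)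

-- ======================= generic small lemmas =======================

theorem pvCard_as_sum (t : Nat) (A : Finset Nat) (hA : A ⊆ Finset.range t) :
    ((A.card : Int)) = ∑ i ∈ Finset.range t, (if i ∈ A then (1:Int) else 0) := by
  have h1 : A = (Finset.range t).filter (fun i => i ∈ A) := by
    ext i
    simp only [Finset.mem_filter]
    exact ⟨fun h => ⟨hA h, h⟩, fun h => h.2⟩
  calc ((A.card : Int)) = (((Finset.range t).filter (fun i => i ∈ A)).card : Int) := by rw [← h1]
    _ = ∑ i ∈ Finset.range t, (if i ∈ A then (1:Int) else 0) := by
          rw [Finset.card_filter]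
          push_cast
          rfl

-- ======================= pvM lemmas (A side) =======================

theorem pvM_self (xs : List Int) (i : Nat) : pvM xs i i = pvG xs i := by
  cases i with
  | zero => rfl
  | succ j => simp [pvM]

theorem pvM_succ (xs : List Int) (i j : Nat) (h : i ≤ j) :
    pvM xs i (j+1) = max (pvM xs i j) (pvG xs (j+1)) := by
  show (if j+1 ≤ i then pvG xs i else max (pvM xs i j) (pvG xs (j+1))) = _
  rw [if_neg (by omega)]

theorem pvM_ge (xs : List Int) (i : Nat) :
    ∀ j k, i ≤ k → k ≤ j → pvG xs k ≤ pvM xs i j := by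
  intro j
  induction j with
  | zero =>
    intro k h1 h2
    have hk : k = 0 := by omega
    have hi : i = 0 := by omega
    subst hk; subst hi
    simp [pvM]
  | succ j ih =>
    intro k h1 h2
    by_cases hji : j + 1 ≤ i
    · have hk : k = i := by omega
      subst hk
      show pvG xs k ≤ if j+1 ≤ k then pvG xs k else _
      rw [if_pos hji]
    · rw [pvM_succ xs i j (by omega)]
      by_cases hkj : k ≤ j
      · exact le_trans (ih k h1 hkj) (le_max_left _ _)
      · have : k = j + 1 := by omega
        subst this
        exact le_max_right _ _


theorem pvM_le (xs : List Int) (i : Nat) :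
    ∀ j (c : Int), pvG xs i ≤ c → (∀ k, i ≤ k → k ≤ j → pvG xs k ≤ c) → pvM xs i j ≤ c := by
  intro j
  induction j with
  | zero =>
    intro c h1 h2
    exact h1
  | succ j ih =>
    intro c h1 h2
    by_cases hji : j + 1 ≤ i
    · show (if j+1 ≤ i then pvG xs i else _) ≤ c
      rw [if_pos hji]; exact h1
    · rw [pvM_succ xs i j (by omega)]
      exact max_le (ih c h1 (fun k hk1 hk2 => h2 k hk1 (by omega))) (h2 (j+1) (by omega) le_rfl)


theorem pvM_left_iff (xs : List Int) (i j : Nat) (h : i ≤ j) :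
    pvM xs i j = pvG xs i ↔ ∀ k ∈ Finset.Icc i j, pvG xs k ≤ pvG xs i := by
  constructor
  · intro he k hk
    rw [Finset.mem_Icc] at hk
    calc pvG xs k ≤ pvM xs i j := pvM_ge xs i j k hk.1 hk.2
      _ = pvG xs i := he
  · intro hall
    refine le_antisymm ?_ (pvM_ge xs i j i le_rfl h)
    exact pvM_le xs i j (pvG xs i) le_rfl (fun k hk1 hk2 => hall k (Finset.mem_Icc.mpr ⟨hk1, hk2⟩))


theorem pvM_right_iff (xs : List Int) (i j : Nat) (h : i ≤ j) :
    pvM xs i j = pvG xs j ↔ ∀ k ∈ Finset.Icc i j, pvG xs k ≤ pvG xs j := by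
  constructor
  · intro he k hk
    rw [Finset.mem_Icc] at hk
    calc pvG xs k ≤ pvM xs i j := pvM_ge xs i j k hk.1 hk.2
      _ = pvG xs j := he
  · intro hall
    refine le_antisymm ?_ (pvM_ge xs i j j h le_rfl)
    exact pvM_le xs i j (pvG xs j) (hall i (Finset.mem_Icc.mpr ⟨le_rfl, h⟩))
      (fun k hk1 hk2 => hall k (Finset.mem_Icc.mpr ⟨hk1, hk2⟩))


-- ======================= A as a double sum =======================

theorem pvInnerA (xs : List Int) (i : Nat) :
    ∀ (d m : Nat), m + d = xs.length → i < m → ∀ (a : Int),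
    ((PySem.List.pyRange (m : Int) ((xs.length : Int)) 1).foldl
      (fun (st : Int × Int) j =>
        let mx := max st.2 (PySem.List.pyGetD xs j 0)
        if mx = PySem.List.pyGetD xs (i : Int) 0 ∨ mx = PySem.List.pyGetD xs j 0 then
          (st.1 + 1, mx)
        else (st.1, mx))
      (a, pvM xs i (m-1)))
    = (a + pvCnt xs i m xs.length, pvM xs i (xs.length - 1)) := by
  intro d
  induction d with
  | zero =>
    intro m hmeq him a
    have hmlen : m = xs.length := by omega
    subst hmlen
    rw [PySem.List.pyRange_one_eq_nil le_rfl]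
    simp [pvCnt]
  | succ d ih =>
    intro m hmeq him a
    have hmlt : m < xs.length := by omega
    rw [PySem.List.pyRange_one_cons (by push_cast; omega), List.foldl_cons]
    have hmx : max (pvM xs i (m-1)) (pvG xs m) = pvM xs i m := by
      have h1 := pvM_succ xs i (m-1) (by omega)
      rw [show m - 1 + 1 = m by omega] at h1
      exact h1.symm
    have hiff : (pvM xs i m = pvG xs i ∨ pvM xs i m = pvG xs m) ↔ pvQ xs i m := by
      unfold pvQ
      rw [pvM_left_iff xs i m (by omega), pvM_right_iff xs i m (by omega)]
    have hsplit : pvCnt xs i m xs.length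
        = (if pvQ xs i m then (1:Int) else 0) + pvCnt xs i (m+1) xs.length := by
      unfold pvCnt
      rw [Finset.sum_eq_sum_Ico_succ_bot (by omega)]
    have hih1 := ih (m+1) (by omega) (by omega)
    simp only [PySem.List.pyGetD_natCast] at hih1 ⊢
    rw [hmx]
    simp only [hiff]
    by_cases hq : pvQ xs i m
    · rw [if_pos hq]
      have h2 := hih1 (a + 1)
      rw [show ((m+1 : Nat) : Int) = ((m : Nat) : Int) + 1 by push_cast; ring,
        show (m + 1) - 1 = m by omega] at h2
      rw [h2, hsplit, if_pos hq]
      simp only [Prod.mk.injEq]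
      exact ⟨by ring, trivial⟩
    · rw [if_neg hq]
      have h2 := hih1 a
      rw [show ((m+1 : Nat) : Int) = ((m : Nat) : Int) + 1 by push_cast; ring,
        show (m + 1) - 1 = m by omega] at h2
      rw [h2, hsplit, if_neg hq]
      simp only [Prod.mk.injEq]
      exact ⟨by ring, trivial⟩

theorem pvOuterA (xs : List Int) :
    ∀ (d m : Nat), m + d = xs.length → ∀ (a : Int),
    ((PySem.List.pyRange (m : Int) ((xs.length : Int)) 1).foldl
      (fun ans i =>
        let ans := ans + 1
        let mx := PySem.List.pyGetD xs i 0
        ((PySem.List.pyRange (i+1) ((xs.length : Int)) 1).foldl (fun (st : Int × Int) j =>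
            let mx := max st.2 (PySem.List.pyGetD xs j 0)
            if mx = PySem.List.pyGetD xs i 0 ∨ mx = PySem.List.pyGetD xs j 0 then
              (st.1 + 1, mx)
            else (st.1, mx)) (ans, mx)).1) a)
    = a + ∑ i ∈ Finset.Ico m xs.length, (1 + pvCnt xs i (i+1) xs.length) := by
  intro d
  induction d with
  | zero =>
    intro m hmeq a
    have hmlen : m = xs.length := by omega
    subst hmlen
    rw [PySem.List.pyRange_one_eq_nil le_rfl]
    simp
  | succ d ih =>
    intro m hmeq a
    have hmlt : m < xs.length := by omega
    rw [PySem.List.pyRange_one_cons (by push_cast; omega), List.foldl_cons]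
    have hinner := pvInnerA xs m (xs.length - (m+1)) (m+1) (by omega) (by omega) (a + 1)
    rw [show ((m+1 : Nat) : Int) = ((m : Nat) : Int) + 1 by push_cast; ring,
      show (m + 1) - 1 = m by omega, pvM_self xs m] at hinner
    simp only [PySem.List.pyGetD_natCast] at hinner ⊢
    rw [hinner]
    have hih := ih (m+1) (by omega) (a + 1 + pvCnt xs m (m+1) xs.length)
    rw [show ((m+1 : Nat) : Int) = ((m : Nat) : Int) + 1 by push_cast; ring] at hih
    simp only [] 
    rw [hih, Finset.sum_eq_sum_Ico_succ_bot hmlt]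
    ring

theorem pvA_eq_T (xs : List Int) :
    numberOfSubarrays2 xs = ∑ i ∈ Finset.range xs.length, (1 + pvCnt xs i (i+1) xs.length) := by
  have h := pvOuterA xs xs.length 0 (by omega) 0
  rw [show ((0 : Nat) : Int) = 0 by norm_num] at h
  unfold numberOfSubarrays2
  rw [h, ← Finset.range_eq_Ico]
  ring

-- ======================= triangle swap =======================

theorem pvQ_self (xs : List Int) (t : Nat) : pvQ xs t t := by
  left
  intro k hk
  rw [Finset.mem_Icc] at hk
  have : k = t := by omega
  subst this
  exact le_rfl

theorem pvT_eq_U (xs : List Int) :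
    ∀ n, (∑ i ∈ Finset.range n, (1 + pvCnt xs i (i+1) n)) = pvU xs n := by
  intro n
  induction n with
  | zero => simp [pvU]
  | succ n ihn =>
    have hcnt0 : pvCnt xs n (n+1) (n+1) = 0 := by
      simp [pvCnt]
    have hptwise : ∀ i ∈ Finset.range n, (1 + pvCnt xs i (i+1) (n+1))
        = (1 + pvCnt xs i (i+1) n) + (if pvQ xs i n then (1:Int) else 0) := by
      intro i hi
      rw [Finset.mem_range] at hi
      rw [pvCnt, Finset.sum_Ico_succ_top (by omega)]
      show (1 : Int) + (pvCnt xs i (i+1) n + _) = _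
      ring
    rw [Finset.sum_range_succ, Finset.sum_congr rfl hptwise, Finset.sum_add_distrib, hcnt0]
    have hU : pvU xs (n+1) = pvU xs n + pvCol xs n := by
      rw [pvU, Finset.sum_range_succ, pvU]
    have hcol : pvCol xs n = ∑ i ∈ Finset.range n, (if pvQ xs i n then (1:Int) else 0) + 1 := by
      rw [pvCol, Finset.sum_range_succ, if_pos (pvQ_self xs n)]
    rw [hU, hcol, ihn]
    ring

-- ======================= S / run structure =======================

theorem pvMem_S (xs : List Int) (t i : Nat) :
    i ∈ pvS xs t ↔ i < t ∧ ∀ k, i < k → k < t → pvG xs k ≤ pvG xs i := by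
  constructor
  · intro h
    rw [Finset.mem_filter, Finset.mem_range] at h
    exact ⟨h.1, fun k hk1 hk2 => h.2 k (Finset.mem_Ioo.mpr ⟨hk1, hk2⟩)⟩
  · intro h
    rw [Finset.mem_filter, Finset.mem_range]
    refine ⟨h.1, fun k hk => ?_⟩
    rw [Finset.mem_Ioo] at hk
    exact h.2 k hk.1 hk.2

theorem pvMem_run (xs : List Int) (t i : Nat) (v : Int) :
    i ∈ pvRun xs t v ↔ (i < t ∧ ∀ k, i < k → k < t → pvG xs k ≤ pvG xs i) ∧ pvG xs i = v := by
  rw [show pvRun xs t v = (pvS xs t).filter (fun i => pvG xs i = v) from rfl,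
    Finset.mem_filter, pvMem_S]

theorem pvLastExceeder_mem (xs : List Int) (t m : Nat) (x : Int) (hm : m < t)
    (hx : x < pvG xs m) (hlast : ∀ k, m < k → k < t → pvG xs k ≤ x) : m ∈ pvS xs t := by
  rw [pvMem_S]
  exact ⟨hm, fun k h1 h2 => le_of_lt (lt_of_le_of_lt (hlast k h1 h2) hx)⟩

theorem pvExists_lastExceeder (xs : List Int) (t : Nat) (x : Int)
    (h : ∃ k, k < t ∧ x < pvG xs k) :
    ∃ m, m < t ∧ x < pvG xs m ∧ ∀ k, m < k → k < t → pvG xs k ≤ x := by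
  obtain ⟨k0, hk0, hx0⟩ := h
  have hne : ((Finset.range t).filter (fun k => x < pvG xs k)).Nonempty := by
    refine ⟨k0, ?_⟩
    rw [Finset.mem_filter, Finset.mem_range]
    exact ⟨hk0, hx0⟩
  have hmem := Finset.max'_mem _ hne
  simp only [Finset.mem_filter, Finset.mem_range] at hmem
  refine ⟨_, hmem.1, hmem.2, fun k h1 h2 => ?_⟩
  by_contra hgt
  push_neg at hgt
  have hkE : k ∈ (Finset.range t).filter (fun k => x < pvG xs k) := by
    rw [Finset.mem_filter, Finset.mem_range]
    exact ⟨h2, hgt⟩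
  have := Finset.le_max' _ k hkE
  omega

theorem pvS_succ (xs : List Int) (t : Nat) :
    pvS xs (t+1) = insert t ((pvS xs t).filter (fun i => pvG xs t ≤ pvG xs i)) := by
  ext i
  rw [Finset.mem_insert, pvMem_S xs (t+1) i]
  have hmemF : i ∈ (pvS xs t).filter (fun i => pvG xs t ≤ pvG xs i) ↔
      (i < t ∧ ∀ k, i < k → k < t → pvG xs k ≤ pvG xs i) ∧ pvG xs t ≤ pvG xs i := by
    rw [Finset.mem_filter, pvMem_S]
  rw [hmemF]
  constructor
  · rintro ⟨h1, h2⟩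
    by_cases hit : i = t
    · exact Or.inl hit
    · exact Or.inr ⟨⟨by omega, fun k a b => h2 k a (by omega)⟩, h2 t (by omega) (by omega)⟩
  · rintro (rfl | ⟨⟨h1, h2⟩, h3⟩)
    · exact ⟨by omega, fun k a b => absurd b (by omega)⟩
    · refine ⟨by omega, fun k a b => ?_⟩
      by_cases hk : k = t
      · subst hk; exact h3
      · exact h2 k a (by omega)

theorem pvRun_succ_self (xs : List Int) (t : Nat) :
    pvRun xs (t+1) (pvG xs t) = insert t (pvRun xs t (pvG xs t)) := by
  ext i
  simp only [pvRun, Finset.mem_filter, pvS_succ, Finset.mem_insert]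
  constructor
  · rintro ⟨rfl | ⟨hS, hle⟩, hv⟩
    · exact Or.inl rfl
    · exact Or.inr ⟨hS, hv⟩
  · rintro (rfl | ⟨hS, hv⟩)
    · exact ⟨Or.inl rfl, rfl⟩
    · exact ⟨Or.inr ⟨hS, le_of_eq hv.symm⟩, hv⟩

theorem pvRun_succ_gt (xs : List Int) (t : Nat) (v : Int) (hv : pvG xs t < v) :
    pvRun xs (t+1) v = pvRun xs t v := by
  ext i
  simp only [pvRun, Finset.mem_filter, pvS_succ, Finset.mem_insert]
  constructor
  · rintro ⟨rfl | ⟨hS, hle⟩, hv⟩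
    · exact absurd hv (by omega)
    · exact ⟨hS, hv⟩
  · rintro ⟨hS, hv⟩
    exact ⟨Or.inr ⟨hS, by omega⟩, hv⟩

theorem pvPG_succ_of_ge (xs : List Int) (t : Nat) (v p : Int) (hp : pvPG xs t v p)
    (hle : pvG xs t ≤ v) : pvPG xs (t+1) v p := by
  rcases hp with ⟨h1, hall⟩ | ⟨m, hm, hxm, hall, hpm⟩
  · refine Or.inl ⟨h1, fun k hk => ?_⟩
    rw [Finset.mem_range] at hk
    by_cases hkt : k = t
    · subst hkt; exact hle
    · exact hall k (Finset.mem_range.mpr (by omega))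
  · rw [Finset.mem_range] at hm
    refine Or.inr ⟨m, Finset.mem_range.mpr (by omega), hxm, fun k hk => ?_, hpm⟩
    rw [Finset.mem_Ioo] at hk
    by_cases hkt : k = t
    · subst hkt; exact hle
    · exact hall k (Finset.mem_Ioo.mpr ⟨hk.1, by omega⟩)

theorem pvGrpOK_succ_of_gt (xs : List Int) (t : Nat) (G : Int × Int × Int × Int)
    (hG : pvGrpOK xs t G) (hv : pvG xs t < G.1) : pvGrpOK xs (t+1) G := by
  obtain ⟨hc, ⟨m, hmr, hmax, hli⟩, hpg⟩ := hG
  refine ⟨?_, ⟨m, ?_, ?_, hli⟩, pvPG_succ_of_ge xs t G.1 G.2.2.2 hpg (le_of_lt hv)⟩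
  · rw [pvRun_succ_gt xs t G.1 hv]; exact hc
  · rw [pvRun_succ_gt xs t G.1 hv]; exact hmr
  · rw [pvRun_succ_gt xs t G.1 hv]; exact hmax

-- ======================= pop phase =======================

theorem pvPop_spec (x : Int) : ∀ (st : List (Int × Int × Int × Int)),
    pvPop x st (pvSumC st)
      = (st.dropWhile (fun G => decide (G.1 < x)), pvSumC (st.dropWhile (fun G => decide (G.1 < x)))) := by
  intro st
  induction st with
  | nil => simp [pvPop, pvSumC, List.dropWhile]
  | cons G rest ih =>
    obtain ⟨v, c, li, pg⟩ := G
    by_cases h : v < x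
    · have harg : pvSumC ((v, c, li, pg) :: rest) - c = pvSumC rest := by
        show c + pvSumC rest - c = pvSumC rest
        ring
      simp only [pvPop, if_pos h, harg, List.dropWhile_cons, decide_eq_true_eq, h, if_pos]
      exact ih
    · simp only [pvPop, if_neg h, List.dropWhile_cons, decide_eq_true_eq, h, if_neg,
        ite_false]

theorem pvDropWhile_eq_filter (x : Int) : ∀ (st : List (Int × Int × Int × Int)),
    st.Pairwise (fun a b => a.1 < b.1) →
    st.dropWhile (fun G => decide (G.1 < x)) = st.filter (fun G => decide (x ≤ G.1)) := by
  intro st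
  induction st with
  | nil => simp
  | cons G rest ih =>
    intro hpw
    rw [List.pairwise_cons] at hpw
    by_cases h : G.1 < x
    · have h2 : ¬ (x ≤ G.1) := by omega
      simp only [List.dropWhile_cons, List.filter_cons, decide_eq_true_eq, h, if_pos, h2,
        ite_false]
      exact ih hpw.2
    · have h2 : x ≤ G.1 := by omega
      simp only [List.dropWhile_cons, List.filter_cons, decide_eq_true_eq, h, ite_false, h2,
        if_pos]
      congr 1
      symm
      rw [List.filter_eq_self]
      intro b hb
      simp only [decide_eq_true_eq]
      have := hpw.1 b hb
      omega

theorem pvSumC_card (xs : List Int) (t : Nat) : ∀ (st : List (Int × Int × Int × Int)),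
    (∀ G ∈ st, pvGrpOK xs t G) → st.Pairwise (fun a b => a.1 < b.1) →
    pvSumC st = (((pvS xs t).filter (fun i => ∃ G ∈ st, G.1 = pvG xs i)).card : Int) := by
  intro st
  induction st with
  | nil =>
    intro _ _
    simp [pvSumC]
  | cons G rest ih =>
    intro hOK hpw
    rw [List.pairwise_cons] at hpw
    have hGOK := hOK G (List.mem_cons_self)
    have hsplit : (pvS xs t).filter (fun i => ∃ G' ∈ G :: rest, G'.1 = pvG xs i)
        = pvRun xs t G.1 ∪ (pvS xs t).filter (fun i => ∃ G' ∈ rest, G'.1 = pvG xs i) := by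
      ext i
      simp only [pvRun, Finset.mem_filter, Finset.mem_union, List.mem_cons]
      constructor
      · rintro ⟨hS, G', (rfl | hG'), hval⟩
        · exact Or.inl ⟨hS, hval.symm⟩
        · exact Or.inr ⟨hS, G', hG', hval⟩
      · rintro (⟨hS, hval⟩ | ⟨hS, G', hG', hval⟩)
        · exact ⟨hS, G, Or.inl rfl, hval.symm⟩
        · exact ⟨hS, G', Or.inr hG', hval⟩
    have hdisj : Disjoint (pvRun xs t G.1)
        ((pvS xs t).filter (fun i => ∃ G' ∈ rest, G'.1 = pvG xs i)) := by
      rw [Finset.disjoint_left]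
      intro i hi1 hi2
      simp only [pvRun, Finset.mem_filter] at hi1 hi2
      obtain ⟨G', hG', hval⟩ := hi2.2
      have := hpw.1 G' hG'
      omega
    rw [hsplit, Finset.card_union_of_disjoint hdisj]
    show G.2.1 + pvSumC rest = _
    rw [hGOK.1, ih (fun G' h => hOK G' (List.mem_cons_of_mem _ h)) hpw.2]
    push_cast
    ring

-- ======================= column count decomposition =======================

theorem pvQ_split (xs : List Int) (t i : Nat) (hit : i < t) :
    pvQ xs i t ↔
      ((i ∈ pvS xs t ∧ pvG xs t ≤ pvG xs i) ∨
       (pvG xs i < pvG xs t ∧ ∀ k ∈ Finset.Ioo i t, pvG xs k ≤ pvG xs t)) := by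
  have hL : (∀ k ∈ Finset.Icc i t, pvG xs k ≤ pvG xs i) ↔
      (i ∈ pvS xs t ∧ pvG xs t ≤ pvG xs i) := by
    rw [pvMem_S]
    constructor
    · intro h
      exact ⟨⟨hit, fun k h1 h2 => h k (Finset.mem_Icc.mpr ⟨by omega, by omega⟩)⟩,
        h t (Finset.mem_Icc.mpr ⟨by omega, le_rfl⟩)⟩
    · rintro ⟨⟨_, h2⟩, h3⟩
      intro k hk
      rw [Finset.mem_Icc] at hk
      by_cases hki : k = i
      · subst hki; exact le_rfl
      · by_cases hkt : k = t
        · subst hkt; exact h3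
        · exact h2 k (by omega) (by omega)
  have hR : (∀ k ∈ Finset.Icc i t, pvG xs k ≤ pvG xs t) ↔
      (pvG xs i ≤ pvG xs t ∧ ∀ k ∈ Finset.Ioo i t, pvG xs k ≤ pvG xs t) := by
    constructor
    · intro h
      exact ⟨h i (Finset.mem_Icc.mpr ⟨le_rfl, by omega⟩),
        fun k hk => h k (Finset.mem_Icc.mpr (by rw [Finset.mem_Ioo] at hk; omega))⟩
    · rintro ⟨h1, h2⟩
      intro k hk
      rw [Finset.mem_Icc] at hk
      by_cases hki : k = i
      · subst hki; exact h1
      · by_cases hkt : k = t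
        · subst hkt; exact le_rfl
        · exact h2 k (Finset.mem_Ioo.mpr ⟨by omega, by omega⟩)
  unfold pvQ
  rw [hL, hR]
  constructor
  · rintro (h | ⟨h1, h2⟩)
    · exact Or.inl h
    · by_cases hge : pvG xs t ≤ pvG xs i
      · refine Or.inl ⟨?_, hge⟩
        rw [pvMem_S]
        exact ⟨hit, fun k a b => le_trans (h2 k (Finset.mem_Ioo.mpr ⟨a, b⟩)) hge⟩
      · exact Or.inr ⟨by omega, h2⟩
  · rintro (⟨h1, h2⟩ | ⟨h1, h2⟩)
    · exact Or.inl ⟨h1, h2⟩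
    · exact Or.inr ⟨by omega, h2⟩

theorem pvColSplit (xs : List Int) (t : Nat) :
    pvCol xs t = 1 + (((pvS xs t).filter (fun i => pvG xs t ≤ pvG xs i)).card : Int)
      + (((Finset.range t).filter
            (fun i => pvG xs i < pvG xs t ∧ ∀ k ∈ Finset.Ioo i t, pvG xs k ≤ pvG xs t)).card : Int) := by
  have hQt := pvQ_self xs t
  rw [pvCol, Finset.sum_range_succ, if_pos hQt]
  have hptwise : ∀ i ∈ Finset.range t, (if pvQ xs i t then (1:Int) else 0)
      = (if i ∈ (pvS xs t).filter (fun i => pvG xs t ≤ pvG xs i) then (1:Int) else 0)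
      + (if i ∈ (Finset.range t).filter
            (fun i => pvG xs i < pvG xs t ∧ ∀ k ∈ Finset.Ioo i t, pvG xs k ≤ pvG xs t)
          then (1:Int) else 0) := by
    intro i hi
    rw [Finset.mem_range] at hi
    have hsplit := pvQ_split xs t i hi
    have hA : i ∈ (pvS xs t).filter (fun i => pvG xs t ≤ pvG xs i) ↔
        (i ∈ pvS xs t ∧ pvG xs t ≤ pvG xs i) := Finset.mem_filter
    have hB : i ∈ (Finset.range t).filter
          (fun i => pvG xs i < pvG xs t ∧ ∀ k ∈ Finset.Ioo i t, pvG xs k ≤ pvG xs t) ↔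
        (pvG xs i < pvG xs t ∧ ∀ k ∈ Finset.Ioo i t, pvG xs k ≤ pvG xs t) := by
      rw [Finset.mem_filter, Finset.mem_range]
      exact ⟨fun h => h.2, fun h => ⟨hi, h⟩⟩
    by_cases hA' : i ∈ pvS xs t ∧ pvG xs t ≤ pvG xs i
    · have hB' : ¬ (pvG xs i < pvG xs t ∧ ∀ k ∈ Finset.Ioo i t, pvG xs k ≤ pvG xs t) := by
        intro hb
        have := hA'.2
        have := hb.1
        omega
      rw [if_pos (hsplit.mpr (Or.inl hA')), if_pos (hA.mpr hA'),
        if_neg (fun hmem => hB' (hB.mp hmem))]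
      norm_num
    · by_cases hB' : pvG xs i < pvG xs t ∧ ∀ k ∈ Finset.Ioo i t, pvG xs k ≤ pvG xs t
      · rw [if_pos (hsplit.mpr (Or.inr hB')), if_neg (fun hmem => hA' (hA.mp hmem)),
          if_pos (hB.mpr hB')]
        norm_num
      · rw [if_neg (fun hq => (hsplit.mp hq).elim hA' hB'),
          if_neg (fun hmem => hA' (hA.mp hmem)), if_neg (fun hmem => hB' (hB.mp hmem))]
        norm_num
  rw [Finset.sum_congr rfl hptwise, Finset.sum_add_distrib]
  rw [← pvCard_as_sum t _ ((Finset.filter_subset _ _).trans (Finset.filter_subset _ _)),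
    ← pvCard_as_sum t _ (Finset.filter_subset _ _)]
  ring

-- the algorithm's arithmetic for the strictly-smaller case
theorem pvCaseB_val (xs : List Int) (t : Nat) (p eq : Int)
    (hp : pvPG xs t (pvG xs t) p) (heq : eq = ((pvRun xs t (pvG xs t)).card : Int)) :
    (((Finset.range t).filter
        (fun i => pvG xs i < pvG xs t ∧ ∀ k ∈ Finset.Ioo i t, pvG xs k ≤ pvG xs t)).card : Int)
      = (t : Int) - p - 1 - eq := by
  rcases hp with ⟨hp1, hall⟩ | ⟨m, hm, hxm, hall, hpm⟩
  · have hall' : ∀ k, k < t → pvG xs k ≤ pvG xs t :=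
      fun k hk => hall k (Finset.mem_range.mpr hk)
    have hBeq : (Finset.range t).filter
          (fun i => pvG xs i < pvG xs t ∧ ∀ k ∈ Finset.Ioo i t, pvG xs k ≤ pvG xs t)
        = (Finset.range t).filter (fun i => pvG xs i < pvG xs t) := by
      apply Finset.filter_congr
      intro i hi
      rw [Finset.mem_range] at hi
      exact ⟨fun h => h.1,
        fun h => ⟨h, fun k hk => hall' k (Finset.mem_Ioo.mp hk).2⟩⟩
    have hrun : pvRun xs t (pvG xs t) = (Finset.range t).filter (fun i => pvG xs i = pvG xs t) := by
      ext i
      rw [pvMem_run, Finset.mem_filter, Finset.mem_range]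
      constructor
      · rintro ⟨⟨h1, _⟩, h3⟩
        exact ⟨h1, h3⟩
      · rintro ⟨h1, h3⟩
        exact ⟨⟨h1, fun k a b => by rw [h3]; exact hall' k b⟩, h3⟩
    have hneg : (Finset.range t).filter (fun i => ¬ pvG xs i < pvG xs t)
        = (Finset.range t).filter (fun i => pvG xs i = pvG xs t) := by
      apply Finset.filter_congr
      intro i hi
      rw [Finset.mem_range] at hi
      have := hall' i hi
      constructor <;> intro <;> omega
    have hpart := Finset.filter_card_add_filter_neg_card_eq_card
      (s := Finset.range t) (p := fun i => pvG xs i < pvG xs t)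
    rw [hneg, Finset.card_range] at hpart
    rw [hBeq, heq, hrun, hp1]
    omega
  · rw [Finset.mem_range] at hm
    have hBeq : (Finset.range t).filter
          (fun i => pvG xs i < pvG xs t ∧ ∀ k ∈ Finset.Ioo i t, pvG xs k ≤ pvG xs t)
        = (Finset.Ioo m t).filter (fun i => pvG xs i < pvG xs t) := by
      ext i
      rw [Finset.mem_filter, Finset.mem_range, Finset.mem_filter, Finset.mem_Ioo]
      constructor
      · rintro ⟨hit, hlt, hbound⟩
        refine ⟨⟨?_, hit⟩, hlt⟩
        by_contra hle
        push_neg at hle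
        rcases Nat.lt_or_ge i m with him | him
        · exact absurd (hbound m (Finset.mem_Ioo.mpr ⟨him, hm⟩)) (by omega)
        · have hieq : i = m := by omega
          subst hieq
          omega
      · rintro ⟨⟨hmi, hit⟩, hlt⟩
        refine ⟨hit, hlt, fun k hk => ?_⟩
        have hk' := Finset.mem_Ioo.mp hk
        exact hall k (Finset.mem_Ioo.mpr ⟨by omega, hk'.2⟩)
    have hrun : pvRun xs t (pvG xs t) = (Finset.Ioo m t).filter (fun i => pvG xs i = pvG xs t) := by
      ext i
      rw [pvMem_run, Finset.mem_filter, Finset.mem_Ioo]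
      constructor
      · rintro ⟨⟨h1, h2⟩, h3⟩
        refine ⟨⟨?_, h1⟩, h3⟩
        by_contra hle
        push_neg at hle
        rcases Nat.lt_or_ge i m with him | him
        · have := h2 m him hm
          omega
        · have hieq : i = m := by omega
          subst hieq
          omega
      · rintro ⟨⟨hmi, hit⟩, h3⟩
        refine ⟨⟨hit, fun k a b => ?_⟩, h3⟩
        rw [h3]
        exact hall k (Finset.mem_Ioo.mpr ⟨by omega, b⟩)
    have hneg : (Finset.Ioo m t).filter (fun i => ¬ pvG xs i < pvG xs t)
        = (Finset.Ioo m t).filter (fun i => pvG xs i = pvG xs t) := by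
      apply Finset.filter_congr
      intro i hi
      have := hall i hi
      constructor <;> intro <;> omega
    have hpart := Finset.filter_card_add_filter_neg_card_eq_card
      (s := Finset.Ioo m t) (p := fun i => pvG xs i < pvG xs t)
    rw [hneg, Nat.card_Ioo] at hpart
    rw [hBeq, heq, hrun, hpm]
    omega

-- ======================= the step =======================

theorem pvStep (xs : List Int) (t : Nat) (st st1 : List (Int × Int × Int × Int))
    (step : Int × Int × List (Int × Int × Int × Int))
    (hinv : pvInv xs t st)
    (hst1 : st1 = st.filter (fun G => decide (pvG xs t ≤ G.1)))
    (hstep :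
      (st1 = [] ∧ step = (-1, 0, [(pvG xs t, 1, (t : Int), -1)])) ∨
      (∃ v c li pg rest, st1 = (v, c, li, pg) :: rest ∧ v = pvG xs t ∧
        step = (pg, c, (v, c + 1, (t : Int), pg) :: rest)) ∨
      (∃ v c li pg rest, st1 = (v, c, li, pg) :: rest ∧ v ≠ pvG xs t ∧
        step = (li, 0, (pvG xs t, 1, (t : Int), li) :: (v, c, li, pg) :: rest))) :
    pvPG xs t (pvG xs t) step.1 ∧ step.2.1 = ((pvRun xs t (pvG xs t)).card : Int) ∧
    pvInv xs (t+1) step.2.2 ∧ pvSumC step.2.2 = pvSumC st1 + 1 ∧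
    pvSumC st1 = (((pvS xs t).filter (fun i => pvG xs t ≤ pvG xs i)).card : Int) := by
  obtain ⟨hOK, hpw, hcov⟩ := hinv
  have hmem1 : ∀ G ∈ st1, pvGrpOK xs t G ∧ pvG xs t ≤ G.1 := by
    intro G hG
    rw [hst1, List.mem_filter] at hG
    exact ⟨hOK G hG.1, by simpa using hG.2⟩
  have hpw1 : st1.Pairwise (fun a b => a.1 < b.1) := by
    rw [hst1]
    exact List.Pairwise.sublist List.filter_sublist hpw
  have hcov1 : ∀ i ∈ pvS xs t, pvG xs t ≤ pvG xs i → ∃ G ∈ st1, G.1 = pvG xs i := by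
    intro i hi hxi
    obtain ⟨G, hG, hval⟩ := hcov i hi
    refine ⟨G, ?_, hval⟩
    rw [hst1, List.mem_filter]
    refine ⟨hG, ?_⟩
    rw [hval]
    exact decide_eq_true hxi
  have hsum1 : pvSumC st1 = (((pvS xs t).filter (fun i => pvG xs t ≤ pvG xs i)).card : Int) := by
    rw [pvSumC_card xs t st1 (fun G h => (hmem1 G h).1) hpw1]
    congr 2
    apply Finset.filter_congr
    intro i hi
    constructor
    · rintro ⟨G, hG, hval⟩
      rw [← hval]
      exact (hmem1 G hG).2
    · intro hxi
      exact hcov1 i hi hxi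
  rcases hstep with ⟨hnil, hstepv⟩ | ⟨v, c, li, pg, rest, hcons, hveq, hstepv⟩ |
      ⟨v, c, li, pg, rest, hcons, hvne, hstepv⟩
  · -- stack empty after popping: nothing in S t reaches pvG xs t
    subst hstepv
    have hnox : ∀ i ∈ pvS xs t, ¬ (pvG xs t ≤ pvG xs i) := by
      intro i hi hxi
      obtain ⟨G, hG, _⟩ := hcov1 i hi hxi
      rw [hnil] at hG
      exact absurd hG (List.not_mem_nil)
    have hnoexc : ∀ k ∈ Finset.range t, pvG xs k ≤ pvG xs t := by
      intro k hk
      by_contra hgt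
      push_neg at hgt
      obtain ⟨m, hm, hxm, hlast⟩ :=
        pvExists_lastExceeder xs t (pvG xs t) ⟨k, Finset.mem_range.mp hk, hgt⟩
      exact hnox m (pvLastExceeder_mem xs t m _ hm hxm hlast) (le_of_lt hxm)
    have hrun0 : pvRun xs t (pvG xs t) = ∅ := by
      rw [Finset.eq_empty_iff_forall_notMem]
      intro i hi
      obtain ⟨⟨h1, h2⟩, h3⟩ := (pvMem_run xs t i _).mp hi
      exact hnox i ((pvMem_S xs t i).mpr ⟨h1, h2⟩) (le_of_eq h3.symm)
    refine ⟨Or.inl ⟨rfl, hnoexc⟩, by rw [hrun0]; simp, ⟨?_, ?_, ?_⟩, ?_, hsum1⟩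
    · intro G hG
      rw [List.mem_singleton] at hG
      subst hG
      refine ⟨?_, ⟨t, ?_, ?_, rfl⟩, ?_⟩
      · show (1 : Int) = _
        rw [pvRun_succ_self, hrun0]
        simp
      · rw [pvRun_succ_self, hrun0]
        simp
      · rw [pvRun_succ_self, hrun0]
        intro i hi
        simp at hi
        omega
      · refine Or.inl ⟨rfl, fun k hk => ?_⟩
        rw [Finset.mem_range] at hk
        by_cases hkt : k = t
        · subst hkt; exact le_rfl
        · exact hnoexc k (Finset.mem_range.mpr (by omega))
    · simp
    · intro i hi
      rw [pvS_succ] at hi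
      rcases Finset.mem_insert.mp hi with rfl | hi'
      · exact ⟨(pvG xs i, 1, (i : Int), -1), by simp, rfl⟩
      · have hmem := Finset.mem_filter.mp hi'
        exact absurd hmem.2 (hnox i hmem.1)
    · rw [hnil]
      show (1 : Int) + 0 = 0 + 1
      ring
  · -- top of the stack carries exactly the value pvG xs t
    subst hstepv
    obtain ⟨⟨hc, ⟨m0, hm0run, hm0max, hli⟩, hpg⟩, hxv⟩ := hmem1 (v, c, li, pg) (by rw [hcons]; exact List.mem_cons_self)
    have hpwc := List.pairwise_cons.mp (by rw [hcons] at hpw1; exact hpw1)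
    have htnotin : t ∉ pvRun xs t (pvG xs t) := by
      intro h
      have := ((pvMem_run xs t t _).mp h).1.1
      omega
    refine ⟨?_, ?_, ⟨?_, ?_, ?_⟩, ?_, hsum1⟩
    · show pvPG xs t (pvG xs t) pg
      rw [← hveq]
      exact hpg
    · show c = _
      rw [← hveq]
      exact hc
    · intro G hG
      rcases List.mem_cons.mp hG with rfl | hGrest
      · refine ⟨?_, ⟨t, ?_, ?_, rfl⟩, ?_⟩
        · show c + 1 = _
          have hins : pvRun xs (t+1) v = insert t (pvRun xs t v) := by
            rw [hveq]
            exact pvRun_succ_self xs t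
          have hc' : c = ((pvRun xs t v).card : Int) := hc
          rw [hins, Finset.card_insert_of_notMem (by rw [hveq]; exact htnotin), hc']
          push_cast
          ring
        · show t ∈ pvRun xs (t+1) v
          rw [hveq, pvRun_succ_self]
          exact Finset.mem_insert_self t _
        · intro i hi
          rw [hveq, pvRun_succ_self] at hi
          rcases Finset.mem_insert.mp hi with rfl | hi'
          · exact le_rfl
          · have := ((pvMem_run xs t i _).mp hi').1.1
            omega
        · show pvPG xs (t+1) v pg
          exact pvPG_succ_of_ge xs t v pg hpg (by rw [hveq])
      · refine pvGrpOK_succ_of_gt xs t G ((hmem1 G (by rw [hcons]; exact List.mem_cons_of_mem _ hGrest)).1) ?_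
        rw [← hveq]
        exact hpwc.1 G hGrest
    · rw [List.pairwise_cons]
      exact ⟨fun G' h => hpwc.1 G' h, hpwc.2⟩
    · intro i hi
      rw [pvS_succ] at hi
      rcases Finset.mem_insert.mp hi with rfl | hi'
      · exact ⟨(v, c + 1, (i : Int), pg), List.mem_cons_self, hveq⟩
      · obtain ⟨hiS, hxi⟩ := Finset.mem_filter.mp hi'
        obtain ⟨G, hG, hval⟩ := hcov1 i hiS hxi
        rw [hcons] at hG
        rcases List.mem_cons.mp hG with rfl | hGrest
        · exact ⟨(v, c + 1, (t : Int), pg), List.mem_cons_self, hval⟩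
        · exact ⟨G, List.mem_cons_of_mem _ hGrest, hval⟩
    · rw [hcons]
      show (c + 1) + pvSumC rest = (c + pvSumC rest) + 1
      ring
  · -- top of the stack is strictly above pvG xs t
    subst hstepv
    obtain ⟨⟨hc, ⟨m0, hm0run, hm0max, hli⟩, hpg⟩, hxv⟩ := hmem1 (v, c, li, pg) (by rw [hcons]; exact List.mem_cons_self)
    have hpwc := List.pairwise_cons.mp (by rw [hcons] at hpw1; exact hpw1)
    have hxltv : pvG xs t < v := lt_of_le_of_ne hxv (fun h => hvne h.symm)
    have hminval : ∀ G ∈ st1, v ≤ G.1 := by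
      intro G hG
      rw [hcons] at hG
      rcases List.mem_cons.mp hG with rfl | hGrest
      · exact le_rfl
      · exact le_of_lt (hpwc.1 G hGrest)
    obtain ⟨⟨hm0t, hm0vis⟩, hm0val⟩ := (pvMem_run xs t m0 v).mp hm0run
    have hrunx : pvRun xs t (pvG xs t) = ∅ := by
      rw [Finset.eq_empty_iff_forall_notMem]
      intro i hi
      obtain ⟨⟨h1, h2⟩, h3⟩ := (pvMem_run xs t i _).mp hi
      obtain ⟨G, hG, hval⟩ := hcov1 i ((pvMem_S xs t i).mpr ⟨h1, h2⟩) (le_of_eq h3.symm)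
      have := hminval G hG
      rw [hval, h3] at this
      omega
    have hPGli : pvPG xs t (pvG xs t) li := by
      refine Or.inr ⟨m0, Finset.mem_range.mpr hm0t, by omega, fun k hk => ?_, hli⟩
      rw [Finset.mem_Ioo] at hk
      by_contra hgt
      push_neg at hgt
      obtain ⟨m', hm', hxm', hlast'⟩ :=
        pvExists_lastExceeder xs t (pvG xs t) ⟨k, hk.2, hgt⟩
      have hm'S : m' ∈ pvS xs t := pvLastExceeder_mem xs t m' _ hm' hxm' hlast'
      have hkm' : k ≤ m' := by
        by_contra hkm
        push_neg at hkm
        exact absurd (hlast' k hkm hk.2) (by omega)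
      obtain ⟨G, hG, hval⟩ := hcov1 m' hm'S (le_of_lt hxm')
      have hvle : v ≤ pvG xs m' := by
        rw [← hval]
        exact hminval G hG
      rcases eq_or_lt_of_le hvle with heq' | hlt'
      · have hm'run : m' ∈ pvRun xs t v := by
          rw [pvMem_run]
          exact ⟨(pvMem_S xs t m').mp hm'S, heq'.symm⟩
        have := hm0max m' hm'run
        omega
      · have := hm0vis m' (by omega) hm'
        omega
    refine ⟨hPGli, by rw [hrunx]; simp, ⟨?_, ?_, ?_⟩, ?_, hsum1⟩
    · intro G hG
      rcases List.mem_cons.mp hG with rfl | hGtail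
      · refine ⟨?_, ⟨t, ?_, ?_, rfl⟩, ?_⟩
        · show (1 : Int) = _
          rw [pvRun_succ_self, hrunx]
          simp
        · rw [pvRun_succ_self, hrunx]
          simp
        · rw [pvRun_succ_self, hrunx]
          intro i hi
          simp at hi
          omega
        · exact pvPG_succ_of_ge xs t _ li hPGli le_rfl
      · rcases List.mem_cons.mp hGtail with rfl | hGrest
        · exact pvGrpOK_succ_of_gt xs t _ ⟨hc, ⟨m0, hm0run, hm0max, hli⟩, hpg⟩ hxltv
        · refine pvGrpOK_succ_of_gt xs t G ((hmem1 G (by rw [hcons]; exact List.mem_cons_of_mem _ hGrest)).1) ?_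
          exact lt_trans hxltv (hpwc.1 G hGrest)
    · rw [List.pairwise_cons]
      constructor
      · intro G' hG'
        rcases List.mem_cons.mp hG' with rfl | hGrest
        · exact hxltv
        · exact lt_trans hxltv (hpwc.1 G' hGrest)
      · rw [← hcons]
        exact hpw1
    · intro i hi
      rw [pvS_succ] at hi
      rcases Finset.mem_insert.mp hi with rfl | hi'
      · exact ⟨(pvG xs i, 1, (i : Int), li), List.mem_cons_self, rfl⟩
      · obtain ⟨hiS, hxi⟩ := Finset.mem_filter.mp hi'
        obtain ⟨G, hG, hval⟩ := hcov1 i hiS hxi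
        rw [hcons] at hG
        exact ⟨G, List.mem_cons_of_mem _ hG, hval⟩
    · rw [hcons]
      show (1 : Int) + (c + pvSumC rest) = (c + pvSumC rest) + 1
      ring

-- ======================= the B loop =======================

theorem pvLoopB (xs : List Int) :
    ∀ (l : List Int) (t : Nat), xs.drop t = l →
    ∀ (ans : Int) (st : List (Int × Int × Int × Int)),
    pvInv xs t st →
    ((PySem.List.enumerate l (t : Int)).foldl
      (fun (s : Int × List (Int × Int × Int × Int) × Int) jx =>
        let ans := s.1
        let j := jx.1
        let x := jx.2
        let popped := pvPop x s.2.1 s.2.2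
        let total := popped.2
        let step :=
          match popped.1 with
          | (v, c, li, pg) :: rest =>
              if v = x then (pg, c, (v, c + 1, j, pg) :: rest)
              else (li, (0 : Int), (x, 1, j, li) :: (v, c, li, pg) :: rest)
          | [] => (-1, (0 : Int), [(x, 1, j, -1)])
        (ans + 1 + total + (j - step.1 - 1 - step.2.1), step.2.2, total + 1))
      (ans, st, pvSumC st)).1
    = ans + ∑ j ∈ Finset.Ico t (t + l.length), pvCol xs j := by
  intro l
  induction l with
  | nil =>
    intro t hdrop ans st hinv
    simp [PySem.List.enumerate_nil]
  | cons y tl ih =>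
    intro t hdrop ans st hinv
    have hyt : pvG xs t = y := by
      have h0 : (xs.drop t)[0]? = some y := by rw [hdrop]; rfl
      rw [List.getElem?_drop] at h0
      rw [show t + 0 = t by omega] at h0
      show xs.getD t 0 = y
      rw [List.getD_eq_getElem?_getD, h0]
      rfl
    subst hyt
    have hdrop' : xs.drop (t+1) = tl := by
      have h1 : (xs.drop t).drop 1 = tl := by rw [hdrop]; rfl
      rw [List.drop_drop] at h1
      exact h1
    have hpop : pvPop (pvG xs t) st (pvSumC st)
        = (st.filter (fun G => decide (pvG xs t ≤ G.1)),
           pvSumC (st.filter (fun G => decide (pvG xs t ≤ G.1)))) := by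
      rw [pvPop_spec, pvDropWhile_eq_filter (pvG xs t) st hinv.2.1]
    rw [PySem.List.enumerate_cons, List.foldl_cons]
    rw [show (t : Int) + 1 = ((t + 1 : Nat) : Int) by push_cast; ring]
    simp only [List.length_cons]
    rw [show t + (tl.length + 1) = (t + 1) + tl.length by omega,
      Finset.sum_eq_sum_Ico_succ_bot (show t < (t+1) + tl.length by omega)]
    rcases hshape : st.filter (fun G => decide (pvG xs t ≤ G.1)) with _ | ⟨⟨v, c, li, pg⟩, rest⟩
    · have hfacts := pvStep xs t st [] (-1, 0, [(pvG xs t, 1, (t : Int), -1)]) hinv hshape.symm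
        (Or.inl ⟨rfl, rfl⟩)
      obtain ⟨hPG, heqc, hinv', hsum2, hsum1⟩ := hfacts
      have hcol : pvCol xs t = 1 + (((pvS xs t).filter (fun i => pvG xs t ≤ pvG xs i)).card : Int)
          + ((t : Int) - (-1) - 1 - 0) := by
        rw [pvColSplit, pvCaseB_val xs t (-1) 0 hPG heqc]
      simp only [hpop, hshape]
      rw [show pvSumC ([] : List (Int × Int × Int × Int)) + 1
          = pvSumC [((pvG xs t), 1, (t : Int), -1)] from hsum2.symm]
      rw [ih (t+1) hdrop' _ _ hinv']
      rw [hcol]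
      rw [show pvSumC ([] : List (Int × Int × Int × Int))
          = (((pvS xs t).filter (fun i => pvG xs t ≤ pvG xs i)).card : Int) from hsum1]
      ring
    · by_cases hveq : v = pvG xs t
      · have hfacts := pvStep xs t st ((v, c, li, pg) :: rest)
          (pg, c, (v, c + 1, (t : Int), pg) :: rest) hinv hshape.symm
          (Or.inr (Or.inl ⟨v, c, li, pg, rest, rfl, hveq, rfl⟩))
        obtain ⟨hPG, heqc, hinv', hsum2, hsum1⟩ := hfacts
        have hcol : pvCol xs t = 1 + (((pvS xs t).filter (fun i => pvG xs t ≤ pvG xs i)).card : Int)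
            + ((t : Int) - pg - 1 - c) := by
          rw [pvColSplit, pvCaseB_val xs t pg c hPG heqc]
        simp only [hpop, hshape, if_pos hveq]
        rw [show pvSumC ((v, c, li, pg) :: rest) + 1
            = pvSumC ((v, c + 1, (t : Int), pg) :: rest) from hsum2.symm]
        rw [ih (t+1) hdrop' _ _ hinv']
        rw [hcol]
        rw [show pvSumC ((v, c, li, pg) :: rest)
            = (((pvS xs t).filter (fun i => pvG xs t ≤ pvG xs i)).card : Int) from hsum1]
        ring
      · have hfacts := pvStep xs t st ((v, c, li, pg) :: rest)
          (li, 0, (pvG xs t, 1, (t : Int), li) :: (v, c, li, pg) :: rest) hinv hshape.symm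
          (Or.inr (Or.inr ⟨v, c, li, pg, rest, rfl, hveq, rfl⟩))
        obtain ⟨hPG, heqc, hinv', hsum2, hsum1⟩ := hfacts
        have hcol : pvCol xs t = 1 + (((pvS xs t).filter (fun i => pvG xs t ≤ pvG xs i)).card : Int)
            + ((t : Int) - li - 1 - 0) := by
          rw [pvColSplit, pvCaseB_val xs t li 0 hPG heqc]
        simp only [hpop, hshape, if_neg hveq]
        rw [show pvSumC ((v, c, li, pg) :: rest) + 1
            = pvSumC ((pvG xs t, 1, (t : Int), li) :: (v, c, li, pg) :: rest) from hsum2.symm]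
        rw [ih (t+1) hdrop' _ _ hinv']
        rw [hcol]
        rw [show pvSumC ((v, c, li, pg) :: rest)
            = (((pvS xs t).filter (fun i => pvG xs t ≤ pvG xs i)).card : Int) from hsum1]
        ring

theorem pvB_eq_U (xs : List Int) : numberOfSubarrays2_alt xs = pvU xs xs.length := by
  have hinv0 : pvInv xs 0 [] := by
    refine ⟨fun G h => absurd h (List.not_mem_nil), List.Pairwise.nil, fun i hi => ?_⟩
    rw [pvMem_S] at hi
    exact absurd hi.1 (by omega)
  have h := pvLoopB xs xs 0 (by simp) 0 [] hinv0
  rw [show ((0 : Nat) : Int) = 0 by norm_num] at h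
  unfold numberOfSubarrays2_alt
  rw [show pvSumC ([] : List (Int × Int × Int × Int)) = 0 from rfl] at h
  rw [h]
  rw [pvU, Finset.range_eq_Ico]
  norm_num

-- ===== VERDICT (by name: the statement is the Claim_ definition above) =====
theorem numberOfSubarrays2_spec : Claim_equal_numberOfSubarrays2 := by
  intro nums _
  unfold Spec_numberOfSubarrays2
  rw [pvA_eq_T, pvB_eq_U, pvT_eq_U]
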